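-- pv_equiv track=rewrite | github.com/pravash02/interviewbit_programs | arrays/perfect_peak_of_array.py | perfect_peakA
-- ===== SOURCE A (Python) =====
-- def perfect_peakA(A):
--     max_left = A[0]
--     min_right = cur_min_right = A[len(A)-1]
--     d = {}
--     d['left_elem'] = 0
--
--     for i in range(1, len(A)-1):
--         max_left = max(A[d['left_elem']:i])
--         min_right = min(A[i+1:])
--
--         if A[i] > A[d['left_elem']]:
--             d['left_elem'] = i
--         if max_left < A[i] < min_right:
--             return 1
--
--     return 0
-- ===== SOURCE B (Python) =====
-- def perfect_peakA(A):
--     n = len(A)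
--     if n < 3:
--         return 0
--     # suf[i] = min(A[i:]) computed once, right to left
--     suf = A[:]
--     for i in range(n - 2, -1, -1):
--         if suf[i + 1] < suf[i]:
--             suf[i] = suf[i + 1]
--     mx = A[0]
--     for x, right_min in zip(A[1:len(A)-1], suf[2:]):
--         if mx < x < right_min:
--             return 1
--         if x > mx:
--             mx = x
--     return 0
-- ===== Notes on version B (the rewrite author's own statement) =====
-- stated objective: faster
-- what changed: A recomputes max(A[left:i]) and min(A[i+1:]) with fresh slices inside the loop (quadratic); B precomputes the suffix-minimum array once and keeps a running prefix maximum in a single linear scan.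
-- crash fix: On the empty list A raises IndexError reading the first element; B returns 0 (no peak exists in an empty array). — e.g. on perfect_peakA([]): A raises IndexError, B returns 0
import Mathlib
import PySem

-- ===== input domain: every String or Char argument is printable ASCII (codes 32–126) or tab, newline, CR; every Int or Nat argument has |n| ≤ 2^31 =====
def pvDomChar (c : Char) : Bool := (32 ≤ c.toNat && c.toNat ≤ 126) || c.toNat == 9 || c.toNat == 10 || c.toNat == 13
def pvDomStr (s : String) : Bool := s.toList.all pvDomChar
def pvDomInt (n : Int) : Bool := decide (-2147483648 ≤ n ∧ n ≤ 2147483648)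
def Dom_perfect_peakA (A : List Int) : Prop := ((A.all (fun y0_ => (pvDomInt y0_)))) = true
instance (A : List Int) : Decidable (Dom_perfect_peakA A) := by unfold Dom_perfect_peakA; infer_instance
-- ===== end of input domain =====

-- B replaces A's per-index slice scans (quadratic) by one precomputed suffix-minimum
-- array plus a running prefix maximum: a single linear scan, same return value.

-- ===== PORT A =====
-- Loop body of A: for i in range(1, len(A)-1) with early `return 1`.
-- The single-key dict d = {'left_elem': …} is represented by its (always present) value `le`.
-- max()/min() of the slices raise ValueError only on empty slices, which never occur for A ≠ []
-- (excluded by Pre_); the `.getD 0` defaults are therefore never the returned values.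
def perfect_peakA_go (A : List Int) (le : Int) : List Int → Int
  | [] => 0
  | i :: rest =>
    let maxLeft := ((PySem.List.max? (PySem.List.slice A (some le) (some i)) (fun y => y)).getD 0)
    let minRight := ((PySem.List.min? (PySem.List.slice A (some (i + 1)) none) (fun y => y)).getD 0)
    let ai := PySem.List.pyGetD A i 0
    let le' := if PySem.List.pyGetD A le 0 < ai then i else le
    if maxLeft < ai ∧ ai < minRight then 1 else perfect_peakA_go A le' rest

def perfect_peakA (A : List Int) : Int :=
  -- the two initial assignments max_left / min_right read the first and the last element
  -- (IndexError on the empty list — excluded by Pre_); both initial values are dead: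
  -- the loop overwrites or never reads them
  let _max_left := PySem.List.pyGetD A 0 0
  let _min_right := PySem.List.pyGetD A ((A.length : Int) - 1) 0
  perfect_peakA_go A 0 (PySem.List.pyRange 1 ((A.length : Int) - 1) 1)

-- ===== PORT B =====
-- suf = A[:]; for i in range(n-2,-1,-1): if suf[i+1] < suf[i]: suf[i] = suf[i+1]
-- ported as the obvious structural right-to-left recursion building the same list.
def perfect_peakA_suf : List Int → List Int
  | [] => []
  | x :: rest =>
    match perfect_peakA_suf rest with
    | [] => [x]
    | y :: t => (if y < x then y else x) :: y :: t

-- for x, right_min in zip(A[1:len(A)-1], suf[2:]): early `return 1`; `if x > mx: mx = x`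
def perfect_peakA_bgo : Int → List (Int × Int) → Int
  | _, [] => 0
  | mx, (x, rm) :: rest =>
    if mx < x ∧ x < rm then 1
    else perfect_peakA_bgo (if mx < x then x else mx) rest

def perfect_peakA_alt (A : List Int) : Int :=
  if A.length < 3 then 0
  else
    let suf := perfect_peakA_suf A
    perfect_peakA_bgo (PySem.List.pyGetD A 0 0)
      ((PySem.List.slice A (some 1) (some ((A.length : Int) - 1))).zip (suf.drop 2))

-- ===== PRECONDITION & SPEC =====
-- Pre_ excludes exactly the empty list, on which A raises IndexError reading the first element.
def Pre_perfect_peakA (A : List Int) : Prop := A ≠ []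
instance (A : List Int) : Decidable (Pre_perfect_peakA A) := by unfold Pre_perfect_peakA; infer_instance
def pvWitness_perfect_peakA : List Int := [3, 1, 4, 6, 5]

-- On the empty list A raises IndexError reading the first element; B returns 0 (no peak exists in an empty array).
def Raises_perfect_peakA (A : List Int) : Prop := A = []
instance (A : List Int) : Decidable (Raises_perfect_peakA A) := by unfold Raises_perfect_peakA; infer_instance
def pvRaiseWitness_perfect_peakA : List Int := []
def pvRaiseWitnessOut_perfect_peakA : Int := 0

def Spec_perfect_peakA (A : List Int) (out : Int) : Prop := out = perfect_peakA_alt A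
instance (A : List Int) (out : Int) : Decidable (Spec_perfect_peakA A out) := by unfold Spec_perfect_peakA; infer_instance

-- ===== CLAIM (what is proved, stated in full; the proofs are below) =====
def Claim_equal_perfect_peakA : Prop := ∀ (A : List Int), Dom_perfect_peakA A → Pre_perfect_peakA A → Spec_perfect_peakA A (perfect_peakA A)
def Claim_raises_perfect_peakA : Prop := (∀ (A : List Int), Dom_perfect_peakA A → Raises_perfect_peakA A → ¬ Pre_perfect_peakA A) ∧ (Dom_perfect_peakA (pvRaiseWitness_perfect_peakA) ∧ Raises_perfect_peakA (pvRaiseWitness_perfect_peakA) ∧ perfect_peakA_alt (pvRaiseWitness_perfect_peakA) = pvRaiseWitnessOut_perfect_peakA)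

-- ===== LEMMAS AND PROOFS =====

def pvPmax (l : List Int) : Int := (PySem.List.max? l (fun y => y)).getD 0

lemma pv_foldl_min_min : ∀ (ts : List Int) (x y : Int),
    ts.foldl min (min x y) = min x (ts.foldl min y)
  | [], _, _ => rfl
  | z :: ts, x, y => by
    simp only [List.foldl_cons]
    rw [min_assoc]
    exact pv_foldl_min_min ts x (min y z)

lemma pv_foldl_max_max : ∀ (ts : List Int) (x y : Int),
    ts.foldl max (max x y) = max x (ts.foldl max y)
  | [], _, _ => rfl
  | z :: ts, x, y => by
    simp only [List.foldl_cons]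
    rw [max_assoc]
    exact pv_foldl_max_max ts x (max y z)

lemma pv_suf_cons (x : Int) (t : List Int) :
    perfect_peakA_suf (x :: t) = (t.foldl min x) :: perfect_peakA_suf t := by
  induction t generalizing x with
  | nil => rfl
  | cons y ts ih =>
    show (match perfect_peakA_suf (y :: ts) with
      | [] => [x]
      | z :: t => (if z < x then z else x) :: z :: t) = _
    rw [ih y]
    show (if ts.foldl min y < x then ts.foldl min y else x) :: ts.foldl min y ::
        perfect_peakA_suf ts = _
    simp only [List.foldl_cons]
    congr 1
    rw [pv_foldl_min_min ts x y]
    omega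

lemma pv_suf_drop : ∀ (l : List Int) (j : Nat),
    (perfect_peakA_suf l).drop j = perfect_peakA_suf (l.drop j)
  | [], j => by simp [perfect_peakA_suf]
  | x :: t, 0 => rfl
  | x :: t, j + 1 => by
    rw [pv_suf_cons, List.drop_succ_cons, List.drop_succ_cons]
    exact pv_suf_drop t j

lemma pv_le_pmax (l : List Int) (y : Int) (hy : y ∈ l) : y ≤ pvPmax l := by
  cases h : PySem.List.max? l (fun z => z) with
  | none =>
    rw [PySem.List.max?_eq_none_iff] at h
    simp [h] at hy
  | some m =>
    have := PySem.List.max?_isMax h y hy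
    simp only [pvPmax, h, Option.getD_some]
    exact this

lemma pv_max?_eq_of_mem (l : List Int) (M : Int) (hM : M ∈ l)
    (hmax : ∀ y ∈ l, y ≤ M) : PySem.List.max? l (fun y => y) = some M := by
  cases h : PySem.List.max? l (fun z => z) with
  | none =>
    rw [PySem.List.max?_eq_none_iff] at h
    simp [h] at hM
  | some m =>
    have h1 : M ≤ m := PySem.List.max?_isMax h M hM
    have h2 : m ≤ M := hmax m (PySem.List.max?_mem h)
    rw [le_antisymm h2 h1]

lemma pv_pmax_step (l : List Int) (hl : l ≠ []) (x : Int) :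
    pvPmax (l ++ [x]) = if pvPmax l < x then x else pvPmax l := by
  obtain ⟨c, u, rfl⟩ := List.exists_cons_of_ne_nil hl
  simp only [pvPmax, List.cons_append, PySem.List.max?_id_cons, Option.getD_some,
    List.foldl_append, List.foldl_cons, List.foldl_nil]
  omega

lemma pv_maxLeft (A : List Int) (le i : Nat) (hle : le < i) (hi : i ≤ A.length)
    (h : A.getD le 0 = pvPmax (A.take i)) :
    PySem.List.max? ((A.drop le).take (i - le)) (fun y => y) = some (pvPmax (A.take i)) := by
  have hlen : le < A.length := lt_of_lt_of_le hle hi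
  have htake : A.take i = A.take le ++ (A.drop le).take (i - le) := by
    rw [← List.take_add]
    congr 1
    omega
  have hget : A.getD le 0 = A[le] := by
    simp [List.getD_eq_getElem?_getD, List.getElem?_eq_getElem hlen]
  have hlt : 0 < ((A.drop le).take (i - le)).length := by
    simp only [List.length_take, List.length_drop]
    omega
  have h0 : ((A.drop le).take (i - le))[0]'hlt = A[le] := by
    simp [List.getElem_take, List.getElem_drop]
  have hmem : pvPmax (A.take i) ∈ (A.drop le).take (i - le) := by
    rw [← h, hget, ← h0]
    exact List.getElem_mem hlt
  apply pv_max?_eq_of_mem _ _ hmem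
  intro y hy
  apply pv_le_pmax
  rw [htake]
  exact List.mem_append_right _ hy

lemma pv_main (A : List Int) :
    ∀ (k i le : Nat), i + k = A.length - 1 → 1 ≤ i → le < i →
      A.getD le 0 = pvPmax (A.take i) →
      perfect_peakA_go A (le : Int) (PySem.List.pyRange (i : Int) ((A.length : Int) - 1) 1)
        = perfect_peakA_bgo (pvPmax (A.take i))
            ((PySem.List.slice A (some (i : Int)) (some ((A.length : Int) - 1))).zip
              ((perfect_peakA_suf A).drop (i + 1))) := by
  intro k
  induction k with
  | zero =>
    intro i le hik h1 hle hinv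
    have hn : 1 ≤ A.length := by omega
    have hcast : ((A.length : Int) - 1) = (i : Nat) := by omega
    rw [hcast, PySem.List.pyRange_one_eq_nil (le_refl _), PySem.List.slice_natCast]
    simp [perfect_peakA_go, perfect_peakA_bgo]
  | succ k ih =>
    intro i le hik h1 hle hinv
    have hn : i + 1 < A.length := by omega
    have hlen : le < A.length := by omega
    have hi : i < A.length := by omega
    have h1' : (i : Int) < (A.length : Int) - 1 := by omega
    rw [PySem.List.pyRange_one_cons h1']
    -- decompose the suffix A.drop (i+1)
    obtain ⟨y, s, hys⟩ : ∃ y s, A.drop (i + 1) = y :: s := by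
      cases hd : A.drop (i + 1) with
      | nil => exfalso; have := List.length_drop (l := A) (i := i + 1); rw [hd] at this; simp at this; omega
      | cons y s => exact ⟨y, s, rfl⟩
    have hget : A.getD le 0 = A[le] := by
      simp [List.getD_eq_getElem?_getD, List.getElem?_eq_getElem hlen]
    have hgeti : A.getD i 0 = A[i] := by
      simp [List.getD_eq_getElem?_getD, List.getElem?_eq_getElem hi]
    -- left side: one step of A's loop
    show (let maxLeft := ((PySem.List.max? (PySem.List.slice A (some (le : Int)) (some (i : Int))) (fun y => y)).getD 0)
      let minRight := ((PySem.List.min? (PySem.List.slice A (some ((i : Int) + 1)) none) (fun y => y)).getD 0)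
      let ai := PySem.List.pyGetD A (i : Int) 0
      let le' := if PySem.List.pyGetD A (le : Int) 0 < ai then (i : Int) else (le : Int)
      if maxLeft < ai ∧ ai < minRight then 1 else perfect_peakA_go A le' (PySem.List.pyRange ((i : Int) + 1) ((A.length : Int) - 1) 1)) = _
    rw [PySem.List.slice_natCast]
    rw [pv_maxLeft A le i hle (le_of_lt hi) hinv]
    have hslice2 : PySem.List.slice A (some ((i : Int) + 1)) none = y :: s := by
      rw [show ((i : Int) + 1) = ((i + 1 : Nat) : Int) by push_cast; ring,
        PySem.List.slice_from_natCast, hys]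
    rw [hslice2, PySem.List.min?_id_cons]
    have hALE : A[le] = pvPmax (A.take i) := by rw [← hget, hinv]
    simp only [Option.getD_some, PySem.List.pyGetD_natCast, hget, hgeti, hALE]
    -- right side: one step of B's loop
    have hdropA : A.drop i = A[i] :: y :: s := by
      rw [List.drop_eq_getElem_cons hi, hys]
    have hsufd : (perfect_peakA_suf A).drop (i + 1) = (s.foldl min y) :: (perfect_peakA_suf A).drop (i + 2) := by
      have hs2 : A.drop (i + 2) = s := by
        rw [show i + 2 = (i + 1) + 1 from rfl, ← List.tail_drop, hys]
        rfl
      rw [pv_suf_drop, hys, pv_suf_cons, pv_suf_drop A (i + 2), hs2]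
    have hsliceR : PySem.List.slice A (some (i : Int)) (some ((A.length : Int) - 1))
        = A[i] :: PySem.List.slice A (some ((i + 1 : Nat) : Int)) (some ((A.length : Int) - 1)) := by
      rw [show ((A.length : Int) - 1) = ((A.length - 1 : Nat) : Int) by omega,
        PySem.List.slice_natCast, PySem.List.slice_natCast, hdropA,
        show A.length - 1 - i = (A.length - 1 - (i + 1)) + 1 by omega, List.take_succ_cons]
      congr 1
      rw [show A.drop (i + 1) = (A.drop i).drop 1 by rw [List.drop_drop], hdropA]
      rfl
    rw [hsliceR, hsufd, List.zip_cons_cons]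
    show _ = (if pvPmax (A.take i) < A[i] ∧ A[i] < s.foldl min y then 1
      else perfect_peakA_bgo (if pvPmax (A.take i) < A[i] then A[i] else pvPmax (A.take i))
        ((PySem.List.slice A (some ((i + 1 : Nat) : Int)) (some ((A.length : Int) - 1))).zip
          ((perfect_peakA_suf A).drop (i + 2))))
    -- the prefix maximum after this step
    have htake : A.take (i + 1) = A.take i ++ [A[i]] := by
      rw [List.take_add_one, List.getElem?_eq_getElem hi]
      rfl
    have htne : A.take i ≠ [] := by
      apply List.ne_nil_of_length_pos
      rw [List.length_take]
      omega
    have hpm : pvPmax (A.take (i + 1)) = if pvPmax (A.take i) < A[i] then A[i] else pvPmax (A.take i) := by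
      rw [htake, pv_pmax_step _ htne]
    by_cases hc : pvPmax (A.take i) < A[i] ∧ A[i] < s.foldl min y
    · rw [if_pos hc, if_pos hc]
    · rw [if_neg hc, if_neg hc]
      by_cases hc2 : pvPmax (A.take i) < A[i]
      · rw [if_pos hc2, if_pos hc2]
        have := ih (i + 1) i (by omega) (by omega) (by omega)
          (by rw [hgeti, hpm, if_pos hc2])
        rw [hpm, if_pos hc2] at this
        rw [show ((i : Int) + 1) = ((i + 1 : Nat) : Int) by push_cast; ring, this]
      · rw [if_neg hc2, if_neg hc2]
        have := ih (i + 1) le (by omega) (by omega) (by omega)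
          (by rw [hinv, hpm, if_neg hc2])
        rw [hpm, if_neg hc2] at this
        rw [show ((i : Int) + 1) = ((i + 1 : Nat) : Int) by push_cast; ring, this]


-- ===== VERDICT (by name: the statement is the Claim_ definition above) =====
theorem perfect_peakA_spec : Claim_equal_perfect_peakA := by
  intro A hdom hpre
  show perfect_peakA A = perfect_peakA_alt A
  by_cases h3 : A.length < 3
  · have hnil : PySem.List.pyRange 1 ((A.length : Int) - 1) 1 = [] :=
      PySem.List.pyRange_one_eq_nil (by omega)
    simp [perfect_peakA, perfect_peakA_alt, hnil, perfect_peakA_go, h3]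
  · obtain ⟨a, t, rfl⟩ := List.exists_cons_of_ne_nil hpre
    have hinv : (a :: t).getD 0 0 = pvPmax ((a :: t).take 1) := by
      simp [pvPmax, PySem.List.max?_id_cons]
    have := pv_main (a :: t) ((a :: t).length - 2) 1 0 (by omega) (le_refl _)
      (by omega) hinv
    rw [show ((1 : Nat) : Int) = (1 : Int) from rfl, show ((0 : Nat) : Int) = (0 : Int) from rfl] at this
    show perfect_peakA_go (a :: t) 0 (PySem.List.pyRange 1 (((a :: t).length : Int) - 1) 1) = _
    rw [this]
    rw [perfect_peakA_alt, if_neg h3]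
    show _ = perfect_peakA_bgo (PySem.List.pyGetD (a :: t) 0 0) _
    have ha : a = pvPmax ((a :: t).take 1) := by simpa using hinv
    rw [PySem.List.pyGetD_zero_cons, ← ha]

theorem perfect_peakA_raises : Claim_raises_perfect_peakA := by
  unfold Claim_raises_perfect_peakA
  exact ⟨fun A _ h hp => hp h, by decide⟩

-- self-check of the crash-fix block: B's port really returns 0 on the raise witness []
theorem perfect_peakA_raises_ok :
    perfect_peakA_alt pvRaiseWitness_perfect_peakA = pvRaiseWitnessOut_perfect_peakA :=
  perfect_peakA_raises.2.2.2
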